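-- pv_equiv track=rewrite | github.com/RuveMaximus/system-of-computer-math | modules/slae/slae.py | attach_unit_matrix
-- ===== SOURCE A (Python) =====
-- def add_column(m: list, col_to_add: list):
--     if len(m) != len(col_to_add):
--         raise ValueError('The length of matrix must be equal to the length of column to add')
--     for i in range(len(m)):
--         m[i].append(col_to_add[i])
--     return m
--
-- def attach_unit_matrix(m):
--     for i in range(len(m)):
--         row = []
--         for j in range(i): row.append(0)
--         row.append(1)
--         for j in range(len(m)-i-1): row.append(0)
--         m = add_column(m, row)
--
--     return m
-- ===== SOURCE B (Python) =====
-- def attach_unit_matrix(m):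
--     n = len(m)
--     for i, row in enumerate(m):
--         row.extend(1 if i == j else 0 for j in range(n))
--     return m
-- ===== Notes on version B (the rewrite author's own statement) =====
-- stated objective: simpler
-- what changed: B replaces A's column-by-column construction (building each identity column as a separate list and calling add_column, which re-scans all rows per column) by a single row-wise pass that extends each row in place with its identity row; both mutate the caller's rows and return the same object.
import Mathlib
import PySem

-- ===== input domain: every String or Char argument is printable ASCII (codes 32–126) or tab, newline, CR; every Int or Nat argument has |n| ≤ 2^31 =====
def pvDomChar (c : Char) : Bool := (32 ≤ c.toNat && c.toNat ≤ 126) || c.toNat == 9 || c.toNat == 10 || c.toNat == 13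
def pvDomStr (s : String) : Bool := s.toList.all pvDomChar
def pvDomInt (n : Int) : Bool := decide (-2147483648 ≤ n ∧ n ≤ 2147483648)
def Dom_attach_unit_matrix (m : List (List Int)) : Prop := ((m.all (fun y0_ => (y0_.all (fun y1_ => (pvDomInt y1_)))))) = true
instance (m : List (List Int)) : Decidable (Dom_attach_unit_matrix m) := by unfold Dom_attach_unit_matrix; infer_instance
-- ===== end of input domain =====

-- B appends each row's identity row in one row-wise pass instead of A's column-by-column add_column calls (simpler).
-- Both Pythons mutate the caller's row lists in place and return the same object; the equivalence proved here is about the return value.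

-- ===== PORT A =====
-- Python add_column: raises ValueError on length mismatch (none); else appends col[i] to row i.
def add_column (m : List (List Int)) (col : List Int) : Option (List (List Int)) :=
  if m.length ≠ col.length then none
  else some (List.zipWith (fun r c => r ++ [c]) m col)

-- loop body of A: build column i (zeros, a one, zeros) and attach it
def stepA (s? : Option (List (List Int))) (i : Nat) : Option (List (List Int)) :=
  s?.bind fun cur =>
    let row : List Int := List.replicate i 0 ++ [1] ++ List.replicate (cur.length - i - 1) 0
    add_column cur row

def attach_unit_matrix (m : List (List Int)) : List (List Int) :=
  (((List.range m.length).foldl stepA (some m)).getD [])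

-- ===== PORT B =====
def attach_unit_matrix_alt (m : List (List Int)) : List (List Int) :=
  let n := m.length
  m.mapIdx (fun i row => row ++ (List.range n).map (fun j => if i = j then (1 : Int) else 0))

-- ===== PRECONDITION & SPEC =====
def Spec_attach_unit_matrix (m : List (List Int)) (out : List (List Int)) : Prop := out = attach_unit_matrix_alt m
instance (m : List (List Int)) (out : List (List Int)) : Decidable (Spec_attach_unit_matrix m out) := by unfold Spec_attach_unit_matrix; infer_instance

-- ===== CLAIM (what is proved, stated in full; the proofs are below) =====
def Claim_equal_attach_unit_matrix : Prop := ∀ (m : List (List Int)), Dom_attach_unit_matrix m → Spec_attach_unit_matrix m (attach_unit_matrix m)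

-- ===== LEMMAS AND PROOFS =====

-- the identity column built at step a, read at row i
theorem rowA_get (n a i : Nat) (ha : a < n) (hi : i < n) :
    (List.replicate a (0 : Int) ++ [1] ++ List.replicate (n - a - 1) 0)[i]'(by
      simp only [List.length_append, List.length_replicate, List.length_cons, List.length_nil]; omega) = if i = a then (1 : Int) else 0 := by
  rcases lt_trichotomy i a with h | h | h
  · rw [List.getElem_append_left (by simp only [List.length_append, List.length_replicate, List.length_cons, List.length_nil]; omega),
      List.getElem_append_left (by simp [List.length_replicate]; omega)]
    simp [List.getElem_replicate]; omega
  · subst h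
    rw [List.getElem_append_left (by simp only [List.length_append, List.length_replicate, List.length_cons, List.length_nil]; omega),
      List.getElem_append_right (by simp [List.length_replicate])]
    simp
  · rw [List.getElem_append_right (by simp only [List.length_append, List.length_replicate, List.length_cons, List.length_nil]; omega)]
    simp [List.getElem_replicate]; omega

-- loop invariant: folding A's step over columns a, a+1, …, a+k-1 appends exactly those identity entries to every row
theorem foldA_inv (n : Nat) : ∀ (k a : Nat) (s : List (List Int)), s.length = n → a + k ≤ n →
    (List.range' a k).foldl stepA (some s) =
      some (s.mapIdx (fun i r =>
        r ++ (List.range' a k).map (fun j => if i = j then (1 : Int) else 0))) := by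
  intro k
  induction k with
  | zero =>
    intro a s hs _
    simp only [List.range'_zero, List.foldl_nil, List.map_nil, List.append_nil]
    exact congrArg some (List.ext_getElem (by simp) (by intro i h1 h2; simp [List.getElem_mapIdx])).symm
  | succ k ih =>
    intro a s hs hk
    have ha : a < n := by omega
    rw [List.range'_succ, List.foldl_cons]
    have hstep : stepA (some s) a =
        some (List.zipWith (fun r c => r ++ [c])
          s (List.replicate a 0 ++ [1] ++ List.replicate (n - a - 1) 0)) := by
      simp only [stepA, Option.bind_some, add_column, hs]
      rw [if_neg (by simp only [List.length_append, List.length_replicate, List.length_cons, List.length_nil]; omega)]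
    rw [hstep]
    set row : List Int := List.replicate a 0 ++ [1] ++ List.replicate (n - a - 1) 0 with hrow
    have hrowlen : row.length = n := by simp [hrow, List.length_append, List.length_replicate]; omega
    have hlen : (List.zipWith (fun r c => r ++ [c]) s row).length = n := by
      simp [List.length_zipWith, hs, hrowlen]
    rw [ih (a + 1) _ hlen (by omega)]
    congr 1
    apply List.ext_getElem
    · simp [hs, hlen]
    · intro i h1 h2
      have hi : i < n := by simpa [hlen] using h1
      rw [List.getElem_mapIdx, List.getElem_mapIdx, List.getElem_zipWith]
      rw [rowA_get n a i ha hi]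
      simp [List.append_assoc]

-- ===== VERDICT (by name: the statement is the Claim_ definition above) =====
theorem attach_unit_matrix_spec : Claim_equal_attach_unit_matrix := by
  intro m _
  unfold Spec_attach_unit_matrix attach_unit_matrix attach_unit_matrix_alt
  rw [List.range_eq_range', foldA_inv m.length m.length 0 m rfl (by omega)]
  simp [List.range_eq_range']
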